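-- pv_equiv track=rewrite | github.com/soolabettu/euler | 77.py | count_prime_partitions_below
-- ===== SOURCE A (Python) =====
-- from math import isqrt
--
-- def primes_below(n: int):
--     """Return list of all primes < n (sieve of Eratosthenes)."""
--     if n <= 2:
--         return []
--     sieve = bytearray(b"\x01") * n
--     sieve[0:2] = b"\x00\x00"  # 0,1 not prime
--     for p in range(2, isqrt(n) + 1):
--         if sieve[p]:
--             step = p
--             start = p * p
--             sieve[start:n:step] = b"\x00" * ((n - start - 1) // step + 1)
--     return [i for i in range(2, n) if sieve[i]]
--
-- def count_prime_partitions_below(n: int) -> int: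
--     """
--     Count partitions of n using only primes < n (order-insensitive, duplicates allowed).
--     Example: n=10 uses primes {2,3,5,7} and counts:
--       (7,3), (5,5), (5,3,2), (3,3,2,2), (2,2,2,2,2)  -> 5
--     """
--     if n <= 1:
--         return 0
--     P = primes_below(n)  # primes < n
--     if not P:
--         return 0
--
--     # Unbounded knapsack / coin-change counting with unique ordering
--     dp = [0] * (n + 1)
--     dp[0] = 1
--     for p in P:
--         for s in range(p, n + 1):
--             dp[s] += dp[s - p]
--     return dp[n]
-- ===== SOURCE B (Python) =====
-- from math import isqrt
--
-- def primes_below(n: int):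
--     """Return list of all primes < n (sieve of Eratosthenes)."""
--     if n <= 2:
--         return []
--     sieve = bytearray(b"\x01") * n
--     sieve[0:2] = b"\x00\x00"  # 0,1 not prime
--     for p in range(2, isqrt(n) + 1):
--         if sieve[p]:
--             step = p
--             start = p * p
--             sieve[start:n:step] = b"\x00" * ((n - start - 1) // step + 1)
--     return [i for i in range(2, n) if sieve[i]]
--
-- def count_prime_partitions_below(n: int) -> int:
--     """
--     Count partitions of n using only primes < n (order-insensitive, duplicates allowed).
--
--     Same sieve, different DP mechanics: instead of sweeping s = p..n with the
--     in-place recurrence dp[s] += dp[s-p], walk each residue class mod p that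
--     contains an index >= p and maintain a running sum
--     acc = dp[s] + dp[s-p] + dp[s-2p] + ..., writing it back; the closed form of
--     the same count is materialised directly, one residue chain at a time.
--     """
--     if n <= 1:
--         return 0
--     P = primes_below(n)  # primes < n
--     if not P:
--         return 0
--
--     dp = [0] * (n + 1)
--     dp[0] = 1
--     for p in P:
--         for r in range(min(p, n - p + 1)):  # residue classes with an index >= p
--             acc = dp[r]
--             s = r + p
--             while s <= n:
--                 acc += dp[s]
--                 dp[s] = acc
--                 s += p
--     return dp[n]
-- ===== Notes on version B (the rewrite author's own statement) =====
-- stated objective: alternative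
-- what changed: The in-place left-to-right coin-change sweep dp[s] += dp[s-p] is replaced by a walk of each residue class mod p with a running sum acc = dp[s] + dp[s-p] + dp[s-2p] + ... written back along the chain: a different traversal order and a different maintained state (the recurrence's closed form), proved to produce the same table.
import Mathlib
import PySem

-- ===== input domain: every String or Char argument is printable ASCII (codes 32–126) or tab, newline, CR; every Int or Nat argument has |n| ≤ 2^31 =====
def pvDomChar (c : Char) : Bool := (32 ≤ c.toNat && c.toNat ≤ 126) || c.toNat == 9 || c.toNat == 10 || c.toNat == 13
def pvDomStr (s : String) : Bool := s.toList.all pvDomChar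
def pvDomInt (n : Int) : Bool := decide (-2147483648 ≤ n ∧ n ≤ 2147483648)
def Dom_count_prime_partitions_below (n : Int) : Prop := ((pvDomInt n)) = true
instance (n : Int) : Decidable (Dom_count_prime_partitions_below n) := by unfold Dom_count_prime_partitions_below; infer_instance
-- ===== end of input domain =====

-- B keeps A's coin-change table but fills it by walking residue classes mod p with a running
-- sum instead of A's in-place dp[s] += dp[s-p] sweep (objective: alternative, same cost).

-- ===== PORT A =====

-- helper shared by both ports (Source B contains the identical primes_below function):
-- 'sieve[start:n:step] = b"\x00" * cnt' — sets cnt indices start, start+step, … to 0 (exact effect of the slice assignment)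
def pvZeroEvery (sv : List Int) (start step : Int) : Nat → List Int
  | 0 => sv
  | c + 1 => pvZeroEvery (PySem.List.pySetD sv start 0) (start + step) step c

def primes_below (n : Int) : List Int :=
  if n ≤ 2 then []
  else
    let sieve := List.replicate n.toNat (1 : Int)      -- bytearray(b"\x01") * n
    let sieve := (sieve.set 0 0).set 1 0               -- sieve[0:2] = b"\x00\x00"
    let sieve := (PySem.List.pyRange 2 ((n.toNat.sqrt : Int) + 1) 1).foldl
      (fun sv p =>
        if PySem.List.pyGetD sv p 0 ≠ 0 then           -- if sieve[p]  (index always in range)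
          pvZeroEvery sv (p * p) p (PySem.Int.floordiv (n - p * p - 1) p + 1).toNat
        else sv) sieve
    (PySem.List.pyRange 2 n 1).foldl
      (fun acc i => if PySem.List.pyGetD sieve i 0 ≠ 0 then acc ++ [i] else acc) []

def count_prime_partitions_below (n : Int) : Int :=
  if n ≤ 1 then 0
  else
    let P := primes_below n
    if P = [] then 0
    else
      let dp := (List.replicate (n + 1).toNat (0 : Int)).set 0 1   -- dp = [0]*(n+1); dp[0] = 1
      let dp := P.foldl (fun dp p =>
        (PySem.List.pyRange p (n + 1) 1).foldl
          (fun dp s => PySem.List.pySetD dp s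
            (PySem.List.pyGetD dp s 0 + PySem.List.pyGetD dp (s - p) 0)) dp) dp   -- dp[s] += dp[s-p]
      PySem.List.pyGetD dp n 0

-- ===== PORT B =====

-- 'while s <= n: acc += dp[s]; dp[s] = acc; s += p' (fuel only makes the loop total; it never runs out)
def pvChain (fuel : Nat) (dp : List Int) (acc s p n : Int) : List Int :=
  match fuel with
  | 0 => dp
  | f + 1 =>
    if s ≤ n then
      let acc' := acc + PySem.List.pyGetD dp s 0
      pvChain f (PySem.List.pySetD dp s acc') acc' (s + p) p n
    else dp

def count_prime_partitions_below_alt (n : Int) : Int :=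
  if n ≤ 1 then 0
  else
    let P := primes_below n
    if P = [] then 0
    else
      let dp := (List.replicate (n + 1).toNat (0 : Int)).set 0 1   -- dp = [0]*(n+1); dp[0] = 1
      let dp := P.foldl (fun dp p =>
        (PySem.List.pyRange 0 (min p (n - p + 1)) 1).foldl
          (fun dp r => pvChain (n + 1).toNat dp (PySem.List.pyGetD dp r 0) (r + p) p n) dp) dp
      PySem.List.pyGetD dp n 0

-- ===== PRECONDITION & SPEC =====
def Spec_count_prime_partitions_below (n : Int) (out : Int) : Prop := out = count_prime_partitions_below_alt n
instance (n : Int) (out : Int) : Decidable (Spec_count_prime_partitions_below n out) := by unfold Spec_count_prime_partitions_below; infer_instance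

-- ===== CLAIM (what is proved, stated in full; the proofs are below) =====
def Claim_equal_count_prime_partitions_below : Prop := ∀ (n : Int), Dom_count_prime_partitions_below n → Spec_count_prime_partitions_below n (count_prime_partitions_below n)

-- ===== LEMMAS AND PROOFS =====

-- the value both inner loops leave at index j after processing prime p over table `old`
def pvF (p : Nat) (old : List Int) (j : Nat) : Int :=
  PySem.List.pyGetD old (j : Int) 0 +
    (if _h : 1 ≤ p ∧ p ≤ j then pvF p old (j - p) else 0)
termination_by j
decreasing_by omega

theorem pvF_def (p : Nat) (old : List Int) (j : Nat) :
    pvF p old j = PySem.List.pyGetD old (j : Int) 0 +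
      (if 1 ≤ p ∧ p ≤ j then pvF p old (j - p) else 0) := by
  rw [pvF, dite_eq_ite]

theorem pvF_small (p : Nat) (old : List Int) (j : Nat) (h : j < p) :
    pvF p old j = PySem.List.pyGetD old (j : Int) 0 := by
  rw [pvF_def, if_neg (by omega)]; ring

theorem pvGetSet (dp : List Int) (i j : Nat) (v : Int) (h : i < dp.length) :
    PySem.List.pyGetD (PySem.List.pySetD dp (i : Int) v) (j : Int) 0
      = if j = i then v else PySem.List.pyGetD dp (j : Int) 0 := by
  rw [PySem.List.pyGetD_pySetD_natCast dp i j v 0 h]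

-- two numbers in the same residue class mod q, within q of each other, are equal
theorem pvModUnique (q t j : Nat) (_hq : 1 ≤ q) (h1 : j % q = t % q) (h2 : t ≤ j)
    (h3 : j < t + q) : j = t := by
  have hd : q ∣ (j - t) := (Nat.modEq_iff_dvd' h2).mp (Nat.ModEq.symm h1)
  have := Nat.eq_zero_of_dvd_of_lt hd
  omega

theorem pvModPlus (q j : Nat) (_hq : 1 ≤ q) (hj : q ≤ j) : j % q + q ≤ j := by
  conv_rhs => rw [← Nat.div_add_mod j q]
  have h1 : 1 ≤ j / q := (Nat.one_le_div_iff (by omega)).mpr hj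
  have h2 : q * 1 ≤ q * (j / q) := Nat.mul_le_mul_left q h1
  omega

-- ===== A's inner loop: the left-to-right sweep computes pvF at every index =====
theorem pvA_inner (p n : Int) (hp : 1 ≤ p) (old : List Int)
    (hL : (old.length : Int) = n + 1) :
    ∀ (k : Nat) (a : Int) (dp : List Int), (n + 1 - a).toNat ≤ k → p ≤ a →
      dp.length = old.length →
      (∀ j : Nat, j < old.length →
        ((j : Int) < a → PySem.List.pyGetD dp (j : Int) 0 = pvF p.toNat old j) ∧
        (a ≤ (j : Int) → PySem.List.pyGetD dp (j : Int) 0 = PySem.List.pyGetD old (j : Int) 0)) →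
      ((PySem.List.pyRange a (n + 1) 1).foldl
          (fun dp s => PySem.List.pySetD dp s
            (PySem.List.pyGetD dp s 0 + PySem.List.pyGetD dp (s - p) 0)) dp).length = old.length ∧
      ∀ j : Nat, j < old.length →
        PySem.List.pyGetD ((PySem.List.pyRange a (n + 1) 1).foldl
          (fun dp s => PySem.List.pySetD dp s
            (PySem.List.pyGetD dp s 0 + PySem.List.pyGetD dp (s - p) 0)) dp) (j : Int) 0
          = pvF p.toNat old j := by
  intro k
  induction k with
  | zero =>
    intro a dp hk ha hlen hinv
    have hna : n + 1 ≤ a := by omega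
    rw [PySem.List.pyRange_one_eq_nil hna]
    refine ⟨hlen, fun j hj => (hinv j hj).1 (by omega)⟩
  | succ k ih =>
    intro a dp hk ha hlen hinv
    by_cases hlt : a < n + 1
    · rw [PySem.List.pyRange_one_cons hlt, List.foldl_cons]
      have ha0 : 0 ≤ a := by omega
      have haN : a = ((a.toNat : Nat) : Int) := by omega
      have haL : a.toNat < dp.length := by omega
      have hsub0 : 0 ≤ a - p := by omega
      have hsubN : a - p = (((a - p).toNat : Nat) : Int) := by omega
      -- values read at this step
      have hv1 : PySem.List.pyGetD dp a 0 = PySem.List.pyGetD old a 0 := by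
        rw [haN]; exact (hinv a.toNat (by omega)).2 (by omega)
      have hv2 : PySem.List.pyGetD dp (a - p) 0 = pvF p.toNat old (a - p).toNat := by
        rw [hsubN]; exact (hinv (a - p).toNat (by omega)).1 (by omega)
      have hval : PySem.List.pyGetD dp a 0 + PySem.List.pyGetD dp (a - p) 0
          = pvF p.toNat old a.toNat := by
        rw [hv1, hv2, pvF_def p.toNat old a.toNat, if_pos (by omega), ← haN]
        congr 2
        omega
      -- apply ih to the updated table
      have := ih (a + 1) (PySem.List.pySetD dp a (PySem.List.pyGetD dp a 0 + PySem.List.pyGetD dp (a - p) 0))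
        (by omega) (by omega)
        (by rw [PySem.List.length_pySetD]; exact hlen)
        (by
          intro j hj
          rw [haN, pvGetSet dp a.toNat j _ (by omega)]
          constructor
          · intro hja
            by_cases hje : j = a.toNat
            · rw [if_pos hje, hje, ← haN]
              exact hval
            · rw [if_neg hje]
              exact (hinv j hj).1 (by omega)
          · intro hja
            rw [if_neg (by omega)]
            exact (hinv j hj).2 (by omega))
      exact this
    · rw [PySem.List.pyRange_one_eq_nil (by omega)]
      refine ⟨hlen, fun j hj => (hinv j hj).1 (by omega)⟩

-- ===== B's residue-chain loop: one chain finishes class r =====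
theorem pvB_chain (p n : Int) (hp : 1 ≤ p) (old : List Int) (hL : (old.length : Int) = n + 1)
    (r : Nat) (hr : r < p.toNat) :
    ∀ (fuel : Nat) (t : Nat) (dp : List Int),
      old.length ≤ t + fuel →
      t % p.toNat = r → r + p.toNat ≤ t →
      dp.length = old.length →
      (∀ j : Nat, j < old.length →
        PySem.List.pyGetD dp (j : Int) 0 =
          if j % p.toNat < r ∨ (j % p.toNat = r ∧ j < t) then pvF p.toNat old j
          else PySem.List.pyGetD old (j : Int) 0) →
      (pvChain fuel dp (pvF p.toNat old (t - p.toNat)) (t : Int) p n).length = old.length ∧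
      ∀ j : Nat, j < old.length →
        PySem.List.pyGetD (pvChain fuel dp (pvF p.toNat old (t - p.toNat)) (t : Int) p n) (j : Int) 0 =
          if j % p.toNat ≤ r then pvF p.toNat old j
          else PySem.List.pyGetD old (j : Int) 0 := by
  intro fuel
  induction fuel with
  | zero =>
    intro t dp hfuel hmod hge hlen hinv
    simp only [pvChain]
    refine ⟨hlen, fun j hj => ?_⟩
    rw [hinv j hj]
    by_cases h1 : j % p.toNat < r
    · rw [if_pos (Or.inl h1), if_pos (by omega)]
    · by_cases h2 : j % p.toNat = r
      · rw [if_pos (Or.inr ⟨h2, by omega⟩), if_pos (by omega)]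
      · rw [if_neg (by omega), if_neg (by omega)]
  | succ fuel ih =>
    intro t dp hfuel hmod hge hlen hinv
    by_cases hend : (t : Int) ≤ n
    · have htL : t < old.length := by omega
      have hq1 : 1 ≤ p.toNat := by omega
      -- dp[t] still holds the old value
      have hvt : PySem.List.pyGetD dp (t : Int) 0 = PySem.List.pyGetD old (t : Int) 0 := by
        rw [hinv t htL, if_neg (by omega)]
      have hacc : pvF p.toNat old (t - p.toNat) + PySem.List.pyGetD dp (t : Int) 0
          = pvF p.toNat old t := by
        rw [hvt, pvF_def p.toNat old t, if_pos (by omega)]; ring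
      have hstep := ih (t + p.toNat)
        (PySem.List.pySetD dp (t : Int) (pvF p.toNat old (t - p.toNat) + PySem.List.pyGetD dp (t : Int) 0))
        (by omega)
        (by rw [Nat.add_mod_right]; exact hmod)
        (by omega)
        (by rw [PySem.List.length_pySetD]; exact hlen)
        (by
          intro j hj
          rw [pvGetSet dp t j _ (by omega)]
          by_cases hjt : j = t
          · rw [if_pos hjt, if_pos (Or.inr ⟨by rw [hjt]; exact hmod, by omega⟩), hjt]
            exact hacc
          · rw [if_neg hjt, hinv j hj]
            by_cases h1 : j % p.toNat < r
            · rw [if_pos (Or.inl h1), if_pos (Or.inl h1)]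
            · by_cases h2 : j % p.toNat = r ∧ j < t + p.toNat
              · have hjle : j < t ∨ j = t := by
                  rcases Nat.lt_or_ge j t with h | h
                  · exact Or.inl h
                  · exact Or.inr (pvModUnique p.toNat t j hq1 (by omega) h h2.2)
                have hjt' : j < t := by rcases hjle with h | h; exact h; exact absurd h hjt
                rw [if_pos (Or.inr ⟨h2.1, hjt'⟩), if_pos (Or.inr ⟨h2.1, by omega⟩)]
              · rw [if_neg (by omega), if_neg (by omega)])
      have e1 : t + p.toNat - p.toNat = t := by omega
      have e2 : ((t + p.toNat : Nat) : Int) = (t : Int) + p := by omega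
      rw [e1, e2, ← hacc] at hstep
      simp only [pvChain, if_pos hend]
      exact hstep
    · simp only [pvChain, if_neg hend]
      refine ⟨hlen, fun j hj => ?_⟩
      rw [hinv j hj]
      by_cases h1 : j % p.toNat < r
      · rw [if_pos (Or.inl h1), if_pos (by omega)]
      · by_cases h2 : j % p.toNat = r
        · rw [if_pos (Or.inr ⟨h2, by omega⟩), if_pos (by omega)]
        · rw [if_neg (by omega), if_neg (by omega)]

-- ===== B's inner loop: all residue classes together compute pvF at every index =====
theorem pvB_inner (p n : Int) (hp : 1 ≤ p) (hpn : p ≤ n) (old : List Int)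
    (hL : (old.length : Int) = n + 1) :
    ∀ (c : Nat) (r : Nat) (dp : List Int), (min p (n - p + 1) - r).toNat ≤ c →
      dp.length = old.length →
      (∀ j : Nat, j < old.length →
        PySem.List.pyGetD dp (j : Int) 0 =
          if j % p.toNat < r then pvF p.toNat old j
          else PySem.List.pyGetD old (j : Int) 0) →
      ((PySem.List.pyRange (r : Int) (min p (n - p + 1)) 1).foldl
          (fun dp r => pvChain (n + 1).toNat dp (PySem.List.pyGetD dp r 0) (r + p) p n) dp).length
        = old.length ∧
      ∀ j : Nat, j < old.length →
        PySem.List.pyGetD ((PySem.List.pyRange (r : Int) (min p (n - p + 1)) 1).foldl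
          (fun dp r => pvChain (n + 1).toNat dp (PySem.List.pyGetD dp r 0) (r + p) p n) dp) (j : Int) 0
          = pvF p.toNat old j := by
  intro c
  induction c with
  | zero =>
    intro r dp hc hlen hinv
    have hm : min p (n - p + 1) ≤ (r : Int) := by omega
    rw [PySem.List.pyRange_one_eq_nil hm, List.foldl_nil]
    refine ⟨hlen, fun j hj => ?_⟩
    rw [hinv j hj]
    by_cases h1 : j % p.toNat < r
    · rw [if_pos h1]
    · rw [if_neg h1]
      -- class j % p.toNat was never touched: its only member below old.length is j itself, j < p
      have hq1 : 1 ≤ p.toNat := by omega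
      have hjp : j < p.toNat := by
        by_contra hge
        have := pvModPlus p.toNat j hq1 (by omega)
        -- j % p ≥ min p (n-p+1) = n-p+1 (the p case is impossible since j % p < p)
        have hmlt : (n - p + 1 : Int) ≤ (r : Int) ∨ (p : Int) ≤ (r : Int) := by
          rcases le_total p (n - p + 1) with h | h
          · right; omega
          · left; omega
        have hmod := Nat.mod_lt j (show 0 < p.toNat by omega)
        omega
      rw [pvF_small p.toNat old j hjp]
  | succ c ih =>
    intro r dp hc hlen hinv
    by_cases hlt : (r : Int) < min p (n - p + 1)
    · rw [PySem.List.pyRange_one_cons hlt, List.foldl_cons]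
      have hq1 : 1 ≤ p.toNat := by omega
      have hrq : r < p.toNat := by omega
      have hrr : r % p.toNat = r := Nat.mod_eq_of_lt hrq
      -- the chain for class r, started at t = r + p with acc = dp[r] = pvF r
      have hv0 : PySem.List.pyGetD dp (r : Int) 0 = pvF p.toNat old r := by
        rw [hinv r (by omega), if_neg (by omega), pvF_small p.toNat old r hrq]
      have hchain := pvB_chain p n hp old hL r hrq (n + 1).toNat (r + p.toNat)
        dp (by omega)
        (by rw [Nat.add_mod_right]; exact Nat.mod_eq_of_lt hrq)
        (by omega) hlen
        (by
          intro j hj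
          rw [hinv j hj]
          by_cases h1 : j % p.toNat < r
          · rw [if_pos h1, if_pos (Or.inl h1)]
          · by_cases h2 : j % p.toNat = r ∧ j < r + p.toNat
            · have hjr : j = r := by
                have hjge : r ≤ j := by
                  have := Nat.mod_le j p.toNat
                  omega
                exact pvModUnique p.toNat r j hq1 (by rw [h2.1, Nat.mod_eq_of_lt hrq]) hjge h2.2
            
              rw [if_neg (by omega), if_pos (Or.inr h2), hjr, pvF_small p.toNat old r hrq]
            · rw [if_neg (by omega), if_neg (by omega)])
      have hcast : ((r : Int) + p) = (((r + p.toNat : Nat) : Int)) := by push_cast; omega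
      have hsub : r + p.toNat - p.toNat = r := by omega
      rw [hv0, hcast]
      rw [hsub] at hchain
      have hnext := ih (r + 1) _ (by omega) hchain.1
        (by
          intro j hj
          rw [hchain.2 j hj]
          by_cases h1 : j % p.toNat ≤ r
          · rw [if_pos h1, if_pos (by omega)]
          · rw [if_neg h1, if_neg (by omega)])
      have hrc : ((r : Int) + 1) = (((r + 1 : Nat) : Int)) := by push_cast; ring
      rw [hrc]
      exact hnext
    · rw [PySem.List.pyRange_one_eq_nil (by omega), List.foldl_nil]
      -- same as the base case
      refine ⟨hlen, fun j hj => ?_⟩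
      rw [hinv j hj]
      by_cases h1 : j % p.toNat < r
      · rw [if_pos h1]
      · rw [if_neg h1]
        have hq1 : 1 ≤ p.toNat := by omega
        have hjp : j < p.toNat := by
          by_contra hge
          have := pvModPlus p.toNat j hq1 (by omega)
          have hmod := Nat.mod_lt j (show 0 < p.toNat by omega)
          omega
        rw [pvF_small p.toNat old j hjp]

-- ===== the two per-prime loops produce the same table, so the two folds agree =====
theorem pvStepEq (p n : Int) (hp : 1 ≤ p) (hpn : p ≤ n) (dp : List Int)
    (hL : (dp.length : Int) = n + 1) :
    (PySem.List.pyRange p (n + 1) 1).foldl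
        (fun dp s => PySem.List.pySetD dp s
          (PySem.List.pyGetD dp s 0 + PySem.List.pyGetD dp (s - p) 0)) dp =
      (PySem.List.pyRange 0 (min p (n - p + 1)) 1).foldl
        (fun dp r => pvChain (n + 1).toNat dp (PySem.List.pyGetD dp r 0) (r + p) p n) dp := by
  have hA := pvA_inner p n hp dp hL (n + 1 - p).toNat p dp (by omega) le_rfl rfl
    (by
      intro j hj
      constructor
      · intro hja
        rw [pvF_small p.toNat dp j (by omega)]
      · intro _; rfl)
  have hB := pvB_inner p n hp hpn dp hL (min p (n - p + 1)).toNat 0 dp (by omega) rfl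
    (by intro j hj; rw [if_neg (by omega)])
  have hB' := hB
  rw [show ((0 : Nat) : Int) = (0 : Int) by rfl] at hB'
  apply List.ext_getElem (by rw [hA.1, hB'.1])
  intro i h1 h2
  have hiL : i < dp.length := by rw [hA.1] at h1; exact h1
  have e1 := hA.2 i hiL
  have e2 := hB'.2 i hiL
  rw [PySem.List.pyGetD_natCast] at e1 e2
  rw [List.getD_eq_getElem _ _ h1] at e1
  rw [List.getD_eq_getElem _ _ h2] at e2
  rw [e1, e2]

theorem pvOuter (n : Int) :
    ∀ (P : List Int), (∀ p ∈ P, 1 ≤ p ∧ p ≤ n) → ∀ dp : List Int, (dp.length : Int) = n + 1 →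
      P.foldl (fun dp p =>
        (PySem.List.pyRange p (n + 1) 1).foldl
          (fun dp s => PySem.List.pySetD dp s
            (PySem.List.pyGetD dp s 0 + PySem.List.pyGetD dp (s - p) 0)) dp) dp =
      P.foldl (fun dp p =>
        (PySem.List.pyRange 0 (min p (n - p + 1)) 1).foldl
          (fun dp r => pvChain (n + 1).toNat dp (PySem.List.pyGetD dp r 0) (r + p) p n) dp) dp := by
  intro P
  induction P with
  | nil => intro _ dp _; rfl
  | cons p Ps ih =>
    intro hbound dp hL
    have hp := hbound p (List.mem_cons_self)
    rw [List.foldl_cons, List.foldl_cons]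
    rw [← pvStepEq p n hp.1 hp.2 dp hL]
    apply ih (fun q hq => hbound q (List.mem_cons_of_mem p hq))
    have hA := pvA_inner p n hp.1 dp hL (n + 1 - p).toNat p dp (by omega) le_rfl rfl
      (by
        intro j hj
        refine ⟨fun hja => ?_, fun _ => rfl⟩
        rw [pvF_small p.toNat dp j (by omega)])
    rw [hA.1]; exact hL

-- every element of the ported sieve output lies in [2, n)
theorem pvPrimesBound (n : Int) : ∀ p ∈ primes_below n, 2 ≤ p ∧ p < n := by
  intro p hp
  unfold primes_below at hp
  by_cases h : n ≤ 2
  · rw [if_pos h] at hp; simp at hp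
  · rw [if_neg h] at hp
    rw [PySem.List.foldl_append_ite_eq_filter] at hp
    simp only [List.nil_append, List.mem_filter] at hp
    have := hp.1
    rw [PySem.List.mem_pyRange_one] at this
    omega

-- ===== VERDICT (by name: the statement is the Claim_ definition above) =====
theorem count_prime_partitions_below_spec : Claim_equal_count_prime_partitions_below := by
  intro n _
  unfold Spec_count_prime_partitions_below
  simp only [count_prime_partitions_below, count_prime_partitions_below_alt]
  by_cases h1 : n ≤ 1
  · rw [if_pos h1, if_pos h1]
  · rw [if_neg h1, if_neg h1]
    by_cases h2 : primes_below n = []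
    · rw [if_pos h2, if_pos h2]
    · rw [if_neg h2, if_neg h2]
      have hlen : ((((List.replicate (n + 1).toNat (0 : Int)).set 0 1).length : Int)) = n + 1 := by
        rw [List.length_set, List.length_replicate]; omega
      rw [pvOuter n (primes_below n)
        (fun p hp => by have := pvPrimesBound n p hp; omega) _ hlen]
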